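-- pv_equiv track=rewrite | github.com/danieltimko/aoc | 2024/09.py | _find_free
-- ===== SOURCE A (Python) =====
-- def _find_free(d, n):
--     length = 0
--     for i in range(len(d)):
--         if d[i] == -1:
--             length += 1
--             if length >= n:
--                 return i-length+1
--         else:
--             length = 0
--     return 0
-- ===== SOURCE B (Python) =====
-- def _find_free(d, n):
--     # pass 1: collect maximal runs of -1 as (start, length) pairs
--     runs = []
--     start = None
--     for i, x in enumerate(d):
--         if x == -1:
--             if start is None:
--                 start = i
--         else:
--             if start is not None:
--                 runs.append((start, i - start))
--                 start = None
--     if start is not None: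
--         runs.append((start, len(d) - start))
--     # pass 2: first run long enough
--     for s, l in runs:
--         if l >= n:
--             return s
--     return 0
-- ===== Notes on version B (the rewrite author's own statement) =====
-- stated objective: alternative
-- what changed: Replaces the fused running-counter scan with an early return by a two-phase decomposition: one pass building the list of maximal runs of -1 as (start, length) pairs, then a scan of that table for the first run of length >= n (0 if none).
import Mathlib
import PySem

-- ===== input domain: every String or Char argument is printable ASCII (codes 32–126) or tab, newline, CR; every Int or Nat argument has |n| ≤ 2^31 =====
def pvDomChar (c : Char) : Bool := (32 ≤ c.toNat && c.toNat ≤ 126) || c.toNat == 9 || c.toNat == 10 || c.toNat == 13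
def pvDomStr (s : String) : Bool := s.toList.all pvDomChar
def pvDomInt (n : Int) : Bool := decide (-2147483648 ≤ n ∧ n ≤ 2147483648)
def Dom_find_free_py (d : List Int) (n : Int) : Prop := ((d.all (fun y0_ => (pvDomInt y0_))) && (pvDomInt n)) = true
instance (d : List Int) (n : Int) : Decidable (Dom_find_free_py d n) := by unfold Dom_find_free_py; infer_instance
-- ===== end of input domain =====

-- ===== PORT A =====
-- A (2024/09.py _find_free): running counter of consecutive -1, early return of run start.
-- Port B: one pass building maximal runs of -1 as (start,length), then pick the first long-enough run.
-- Both ports are total; return-value equivalence is proved on all of Dom.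
def goA (d : List Int) (n : Int) (i : Int) (length : Int) : Int :=
  match d with
  | [] => 0
  | x :: rest =>
    if x = -1 then
      if length + 1 ≥ n then i - (length + 1) + 1
      else goA rest n (i + 1) (length + 1)
    else goA rest n (i + 1) 0

def find_free_py (d : List Int) (n : Int) : Int := goA d n 0 0

-- ===== PORT B =====
def runsB (d : List Int) (i : Int) (start : Option Int) : List (Int × Int) :=
  match d with
  | [] =>
    match start with
    | none => []
    | some s => [(s, i - s)]
  | x :: rest =>
    if x = -1 then
      runsB rest (i + 1) (match start with | none => some i | some s => some s)
    else
      match start with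
      | none => runsB rest (i + 1) none
      | some s => (s, i - s) :: runsB rest (i + 1) none

def pickB (rs : List (Int × Int)) (n : Int) : Int :=
  match rs with
  | [] => 0
  | (s, l) :: t => if l ≥ n then s else pickB t n

def find_free_py_alt (d : List Int) (n : Int) : Int := pickB (runsB d 0 none) n

-- ===== PRECONDITION & SPEC =====
def Spec_find_free_py (d : List Int) (n : Int) (out : Int) : Prop := out = find_free_py_alt d n
instance (d : List Int) (n : Int) (out : Int) : Decidable (Spec_find_free_py d n out) := by unfold Spec_find_free_py; infer_instance

-- ===== CLAIM (what is proved, stated in full; the proofs are below) =====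
def Claim_equal_find_free_py : Prop := ∀ (d : List Int) (n : Int), Dom_find_free_py d n → Spec_find_free_py d n (find_free_py d n)

-- ===== LEMMAS AND PROOFS =====
-- An open run only grows: runsB with an open run starting at s produces (s, L) first, L ≥ i - s.
lemma runsB_open (d : List Int) (i s : Int) :
    ∃ L rs, runsB d i (some s) = (s, L) :: rs ∧ i - s ≤ L := by
  induction d generalizing i with
  | nil => exact ⟨i - s, [], rfl, le_refl _⟩
  | cons x rest ih =>
    by_cases hx : x = -1
    · obtain ⟨L, rs, h, hL⟩ := ih (i + 1)
      exact ⟨L, rs, by simp [runsB, hx, h], by omega⟩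
    · exact ⟨i - s, runsB rest (i + 1) none, by simp [runsB, hx], le_refl _⟩

lemma goA_eq (d : List Int) (n : Int) : ∀ (i l : Int), 0 ≤ l → (l = 0 ∨ l < n) →
    goA d n i l = pickB (runsB d i (if l = 0 then none else some (i - l))) n := by
  induction d with
  | nil =>
    intro i l _ hcase
    rcases hcase with h0 | hlt
    · simp [goA, runsB, h0, pickB]
    · by_cases h0 : l = 0
      · simp [goA, runsB, h0, pickB]
      · simp only [goA, runsB, h0, if_false]
        have : i - (i - l) = l := by omega
        simp [pickB, this, not_le.mpr hlt]
  | cons x rest ih =>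
    intro i l hl hcase
    by_cases hx : x = -1
    · by_cases hret : l + 1 ≥ n
      · -- A returns i - l; B: open run at i - l with final length ≥ l+1 ≥ n
        have hopen : ∀ s, s = i - l →
            pickB (runsB (x :: rest) i (if l = 0 then none else some s)) n = s := by
          intro s hs
          have : runsB (x :: rest) i (if l = 0 then none else some s)
              = runsB rest (i + 1) (some s) := by
            by_cases h0 : l = 0 <;> simp [runsB, hx, h0, hs]
          rw [this]
          obtain ⟨L, rs, h, hL⟩ := runsB_open rest (i + 1) s
          have hLn : L ≥ n := by omega
          simp [h, pickB, hLn]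
        have hA : goA (x :: rest) n i l = i - l := by
          simp [goA, hx, hret]; omega
        rw [hA, hopen (i - l) rfl]
      · have hstep : goA (x :: rest) n i l = goA rest n (i + 1) (l + 1) := by
          simp [goA, hx, hret]
        rw [hstep, ih (i + 1) (l + 1) (by omega) (by omega)]
        have h1 : ¬ (l + 1 = 0) := by omega
        have h2 : (i + 1) - (l + 1) = i - l := by omega
        by_cases h0 : l = 0 <;> simp [runsB, hx, h0, h1, h2]
    · have hstep : goA (x :: rest) n i l = goA rest n (i + 1) 0 := by
        simp [goA, hx]
      rw [hstep, ih (i + 1) 0 (by omega) (Or.inl rfl)]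
      by_cases h0 : l = 0
      · simp [runsB, hx, h0]
      · have hlt : l < n := by tauto
        have : i - (i - l) = l := by omega
        simp [runsB, hx, h0, pickB, this, not_le.mpr hlt]

-- ===== VERDICT (by name: the statement is the Claim_ definition above) =====
theorem find_free_py_spec : Claim_equal_find_free_py := by
  intro d n _
  unfold Spec_find_free_py find_free_py find_free_py_alt
  simpa using goA_eq d n 0 0 (le_refl 0) (Or.inl rfl)
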